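-- pv_equiv track=rewrite | github.com/jayzhou125/leetcode-questions | Cut off rank.py | countLevelUpPlayers
-- ===== SOURCE A (Python) =====
-- from collections import Counter
--
-- def countLevelUpPlayers(cutOffRank, num, scores):
--     sortedS = sorted(list(set(scores)), reverse = 1)
--     scoreCount = Counter(scores)
--     count = 0
--     while count < cutOffRank:
--         score = sortedS.pop(0)
--         count += scoreCount[score]
--     return count
-- ===== SOURCE B (Python) =====
-- def countLevelUpPlayers(cutOffRank, num, scores):
--     if cutOffRank <= 0:
--         return 0
--     threshold = sorted(scores, reverse=True)[cutOffRank - 1]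
--     return sum(1 for x in scores if x >= threshold)
-- ===== Notes on version B (the rewrite author's own statement) =====
-- stated objective: simpler
-- what changed: Replaced A's accumulate-group-counts-until-cutoff loop (set dedup + Counter + pop(0)) by order-statistic selection: B sorts once, takes the cutOffRank-th largest score as a threshold, and returns the count of elements >= it - no accumulation loop at all.
import Mathlib
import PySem

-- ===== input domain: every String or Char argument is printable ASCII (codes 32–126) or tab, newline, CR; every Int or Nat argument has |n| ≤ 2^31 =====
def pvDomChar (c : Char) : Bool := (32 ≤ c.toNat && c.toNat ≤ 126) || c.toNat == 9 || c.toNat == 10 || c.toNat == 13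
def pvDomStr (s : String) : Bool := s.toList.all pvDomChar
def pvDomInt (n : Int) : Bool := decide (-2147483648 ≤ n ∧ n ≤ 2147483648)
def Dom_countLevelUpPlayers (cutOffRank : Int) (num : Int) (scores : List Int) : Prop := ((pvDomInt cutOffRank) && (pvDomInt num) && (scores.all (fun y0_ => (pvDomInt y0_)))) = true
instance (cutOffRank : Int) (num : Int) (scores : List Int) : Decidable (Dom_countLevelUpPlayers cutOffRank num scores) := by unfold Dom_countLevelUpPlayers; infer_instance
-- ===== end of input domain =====

-- B replaces A's accumulate-groups-until-cutoff loop by order-statistic selection: pick the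
-- cutOffRank-th largest score as a threshold and count the elements ≥ it (simpler, no loop state).

-- ===== PORT A =====
-- A's while loop: pop the largest remaining distinct score, add its Counter multiplicity.
def pvALoop (cutOffRank : Int) (scoreCount : PySem.Dict Int Int) (count : Int) (sortedS : List Int) : Int :=
  if count < cutOffRank then
    match sortedS with
    | [] => count          -- sortedS.pop(0) raises IndexError here (excluded by Pre_)
    | score :: rest => pvALoop cutOffRank scoreCount (count + scoreCount.getD score 0) rest
  else count
termination_by sortedS.length
decreasing_by simp_all

def countLevelUpPlayers (cutOffRank : Int) (num : Int) (scores : List Int) : Int :=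
  let sortedS := PySem.List.sorted (PySem.Set.ofList scores) (fun x => x) true
  let scoreCount := PySem.Dict.counter scores
  pvALoop cutOffRank scoreCount 0 sortedS

-- ===== PORT B =====
def countLevelUpPlayers_alt (cutOffRank : Int) (num : Int) (scores : List Int) : Int :=
  if cutOffRank ≤ 0 then 0
  else
    match PySem.List.pyGet? (PySem.List.sorted scores (fun x => x) true) (cutOffRank - 1) with
    | none => 0            -- sorted(...)[cutOffRank-1] raises IndexError here (excluded by Pre_)
    | some threshold => ((scores.countP (fun x => decide (threshold ≤ x))) : Int)

-- ===== PRECONDITION & SPEC =====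
-- Pre_ excludes exactly the inputs where both Pythons raise IndexError:
-- cutOffRank exceeding the total number of players.
def Pre_countLevelUpPlayers (cutOffRank : Int) (num : Int) (scores : List Int) : Prop :=
  cutOffRank ≤ (scores.length : Int)
instance (cutOffRank : Int) (num : Int) (scores : List Int) : Decidable (Pre_countLevelUpPlayers cutOffRank num scores) := by unfold Pre_countLevelUpPlayers; infer_instance

def pvWitness_countLevelUpPlayers : Int × Int × List Int := (2, 3, [5, 7, 5])

def Spec_countLevelUpPlayers (cutOffRank : Int) (num : Int) (scores : List Int) (out : Int) : Prop := out = countLevelUpPlayers_alt cutOffRank num scores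
instance (cutOffRank : Int) (num : Int) (scores : List Int) (out : Int) : Decidable (Spec_countLevelUpPlayers cutOffRank num scores out) := by unfold Spec_countLevelUpPlayers; infer_instance

-- ===== CLAIM =====
def Claim_equal_countLevelUpPlayers : Prop := ∀ (cutOffRank : Int) (num : Int) (scores : List Int), Dom_countLevelUpPlayers cutOffRank num scores → Pre_countLevelUpPlayers cutOffRank num scores → Spec_countLevelUpPlayers cutOffRank num scores (countLevelUpPlayers cutOffRank num scores)

-- ===== LEMMAS AND PROOFS =====

-- counting elements of the grouped list
theorem pv_count_flatMap (d : List Int) (k : Int → Nat) (hnd : d.Nodup) (v : Int) :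
    (d.flatMap (fun u => List.replicate (k u) u)).count v = if v ∈ d then k v else 0 := by
  induction d with
  | nil => simp
  | cons u d' ih =>
    have hnd' : d'.Nodup := hnd.of_cons
    have hu : u ∉ d' := (List.nodup_cons.mp hnd).1
    simp only [List.flatMap_cons, List.count_append, List.count_replicate, ih hnd']
    by_cases hvu : v = u
    · subst hvu
      simp [hu]
    · simp [hvu, Ne.symm hvu]

theorem pv_pairwise_flatMap (d : List Int) (k : Int → Nat) (hpw : d.Pairwise (· > ·)) :
    List.Pairwise (fun a b => b ≤ a) (d.flatMap (fun u => List.replicate (k u) u)) := by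
  induction d with
  | nil => simp
  | cons v d' ih =>
    have hv : ∀ u ∈ d', v > u := fun u hu => (List.pairwise_cons.mp hpw).1 u hu
    simp only [List.flatMap_cons]
    rw [List.pairwise_append]
    refine ⟨List.pairwise_replicate.mpr (Or.inr le_rfl), ih hpw.of_cons, ?_⟩
    intro a ha b hb
    have hav := List.eq_of_mem_replicate ha
    subst hav
    rcases List.mem_flatMap.mp hb with ⟨u, hu, hbu⟩
    have := List.eq_of_mem_replicate hbu
    subst this
    exact le_of_lt (hv b hu)

theorem pv_countP_replicate (k : Nat) (v : Int) (p : Int → Bool) :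
    (List.replicate k v).countP p = if p v then k else 0 := by
  induction k with
  | zero => simp
  | succ n ih =>
    rw [List.replicate_succ, List.countP_cons, ih]
    by_cases h : p v <;> simp [h]

-- A's loop value = count of elements ≥ the (cut - count)-th element of the grouped list.
theorem pv_main (cut : Int) (cnt : PySem.Dict Int Int) :
    ∀ (d : List Int) (count t : Int),
      d.Pairwise (· > ·) → (∀ v ∈ d, 1 ≤ cnt.getD v 0) →
      count < cut →
      (d.flatMap (fun v => List.replicate (cnt.getD v 0).toNat v))[(cut - count - 1).toNat]? = some t →
      pvALoop cut cnt count d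
        = count + (((d.flatMap (fun v => List.replicate (cnt.getD v 0).toNat v)).countP
            (fun x => decide (t ≤ x))) : Int) := by
  intro d
  induction d with
  | nil =>
    intro count t _ _ hlt hget
    simp at hget
  | cons v d' ih =>
    intro count t hpw hone hlt hget
    have hv : ∀ u ∈ d', v > u := fun u hu => (List.pairwise_cons.mp hpw).1 u hu
    have hone' : ∀ u ∈ d', 1 ≤ cnt.getD u 0 := fun u hu => hone u (List.mem_cons_of_mem _ hu)
    have h1 : 1 ≤ cnt.getD v 0 := hone v List.mem_cons_self
    obtain ⟨k, hkv⟩ : ∃ k : Nat, cnt.getD v 0 = (k : Int) :=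
      ⟨(cnt.getD v 0).toNat, (Int.toNat_of_nonneg (by omega)).symm⟩
    have hk1 : 1 ≤ k := by omega
    simp only [List.flatMap_cons, hkv, Int.toNat_natCast] at hget ⊢
    by_cases hle : cut ≤ count + (k : Int)
    · -- the group containing position cut-1 is v's group: t = v and the loop stops after it
      have hidx : (cut - count - 1).toNat < k := by omega
      rw [List.getElem?_append_left (by simpa using hidx), List.getElem?_replicate,
        if_pos hidx] at hget
      have ht : v = t := by simpa using hget
      subst ht
      have hz : (d'.flatMap (fun u => List.replicate (cnt.getD u 0).toNat u)).countP
          (fun x => decide (v ≤ x)) = 0 := by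
        rw [List.countP_eq_zero]
        intro x hx
        rcases List.mem_flatMap.mp hx with ⟨u, hu, hxu⟩
        have := List.eq_of_mem_replicate hxu
        subst this
        simp
        exact hv x hu
      rw [List.countP_append, pv_countP_replicate, hz]
      simp only [le_refl, decide_true, if_true, Nat.add_zero]
      rw [pvALoop.eq_def]
      simp only [hlt, if_true]
      rw [hkv, pvALoop.eq_def]
      simp [show ¬ (count + (k : Int) < cut) from by omega]
    · -- the loop continues past v's whole group
      have hknat : k ≤ (cut - count - 1).toNat := by omega
      rw [List.getElem?_append_right (by simpa using hknat)] at hget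
      have hshift : (cut - count - 1).toNat - (List.replicate k v).length
          = (cut - (count + (k : Int)) - 1).toNat := by
        simp only [List.length_replicate]; omega
      rw [hshift] at hget
      have htle : t ≤ v := by
        have htmem : t ∈ d'.flatMap (fun u => List.replicate (cnt.getD u 0).toNat u) :=
          List.mem_of_getElem? hget
        rcases List.mem_flatMap.mp htmem with ⟨u, hu, htu⟩
        have := List.eq_of_mem_replicate htu
        subst this
        exact le_of_lt (hv t hu)
      have hrec := ih (count + (k : Int)) t hpw.of_cons hone' (by omega) hget
      rw [pvALoop.eq_def]
      simp only [hlt, if_true]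
      rw [hkv, hrec, List.countP_append, pv_countP_replicate]
      simp only [htle, decide_true, if_true]
      push_cast
      ring

-- ===== VERDICT =====
theorem countLevelUpPlayers_spec : Claim_equal_countLevelUpPlayers := by
  intro cut num scores _ hpre
  unfold Spec_countLevelUpPlayers countLevelUpPlayers countLevelUpPlayers_alt
  simp only
  by_cases hc : cut ≤ 0
  · rw [pvALoop.eq_def]
    simp [hc, show ¬ ((0:Int) < cut) by omega]
  · push_neg at hc
    simp only [show ¬ (cut ≤ 0) by omega, if_false]
    set d := PySem.List.sorted (PySem.Set.ofList scores) (fun x => x) true with hd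
    set s := PySem.List.sorted scores (fun x => x) true with hs
    have hperm : d.Perm (PySem.Set.ofList scores) := PySem.List.sorted_perm _ _ _
    have hnd : d.Nodup := hperm.nodup_iff.mpr (PySem.Set.nodup_ofList scores)
    have hmem : ∀ v, v ∈ d ↔ v ∈ scores := by
      intro v
      rw [hperm.mem_iff, PySem.Set.mem_ofList]
    have hge : List.Pairwise (fun a b => b ≤ a) d := PySem.List.sorted_pairwise_rev _ _
    have hpw : d.Pairwise (· > ·) :=
      (hge.and hnd).imp (fun h => lt_of_le_of_ne h.1 h.2.symm)
    have hone : ∀ v ∈ d, 1 ≤ (PySem.Dict.counter scores).getD v 0 := by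
      intro v hv
      rw [PySem.Dict.getD_counter]
      have : 0 < scores.count v := List.count_pos_iff.mpr ((hmem v).mp hv)
      omega
    -- the full sorted list is d's groups concatenated
    have hflat : s = d.flatMap (fun v => List.replicate ((PySem.Dict.counter scores).getD v 0).toNat v) := by
      have hfun : ∀ v, ((PySem.Dict.counter scores).getD v 0).toNat = scores.count v := by
        intro v; rw [PySem.Dict.getD_counter]; exact Int.toNat_natCast _
      have hperm2 : (d.flatMap (fun v => List.replicate ((PySem.Dict.counter scores).getD v 0).toNat v)).Perm scores := by
        rw [List.perm_iff_count]
        intro v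
        rw [pv_count_flatMap d _ hnd v, hfun v]
        by_cases hvs : v ∈ scores
        · simp [(hmem v).mpr hvs]
        · have : v ∉ d := fun h => hvs ((hmem v).mp h)
          simp [this, List.count_eq_zero_of_not_mem hvs]
      have hpw2 := pv_pairwise_flatMap d (fun v => ((PySem.Dict.counter scores).getD v 0).toNat) hpw
      have h1 := PySem.List.sorted_perm scores (fun x => x) true
      have h2 := PySem.List.sorted_pairwise_rev scores (fun x => x)
      exact (h1.trans hperm2.symm).eq_of_pairwise (fun a b _ _ hab hba => by omega) h2 hpw2
    have hslen : s.length = scores.length :=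
      (PySem.List.sorted_perm scores (fun x => x) true).length_eq
    have hpre' : cut ≤ (scores.length : Int) := hpre
    have hget : PySem.List.pyGet? s (cut - 1) = s[(cut - 1).toNat]? :=
      PySem.List.pyGet?_of_nonneg _ (by omega)
    have hlt : (cut - 1).toNat < s.length := by rw [hslen]; omega
    rw [hget, List.getElem?_eq_getElem hlt]
    have hget' : (d.flatMap (fun v => List.replicate ((PySem.Dict.counter scores).getD v 0).toNat v))[(cut - 0 - 1).toNat]?
        = some s[(cut - 1).toNat] := by
      rw [← hflat, show cut - 0 - 1 = cut - 1 from by ring]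
      exact List.getElem?_eq_getElem hlt
    have hmain := pv_main cut (PySem.Dict.counter scores) d 0 s[(cut - 1).toNat] hpw hone (by omega) hget'
    have hcp : s.countP (fun x => decide (s[(cut - 1).toNat] ≤ x))
        = scores.countP (fun x => decide (s[(cut - 1).toNat] ≤ x)) :=
      (PySem.List.sorted_perm scores (fun x => x) true).countP_eq _
    show pvALoop cut (PySem.Dict.counter scores) 0 d
        = ((scores.countP (fun x => decide (s[(cut - 1).toNat] ≤ x))) : Int)
    rw [hmain, ← hflat, hcp]
    ring
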